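-- pv_equiv track=rewrite | github.com/karlmfvillanueva/berlin-hackathon-2026-hera | backend/src/agent/photo_analyser.py | _normalize_selected
-- ===== SOURCE A (Python) =====
-- from typing import Any
--
-- def _normalize_selected(indices: list[Any], n_photos: int) -> list[int]:
--     if n_photos <= 0:
--         return []
--     cap = min(5, n_photos)
--     seen: set[int] = set()
--     out: list[int] = []
--     for raw in indices:
--         if not isinstance(raw, int):
--             continue
--         if raw < 1 or raw > n_photos:
--             continue
--         if raw in seen:
--             continue
--         seen.add(raw)
--         out.append(raw)
--         if len(out) >= cap:
--             break
--     if len(out) < cap: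
--         for i in range(1, n_photos + 1):
--             if i not in seen:
--                 seen.add(i)
--                 out.append(i)
--                 if len(out) >= cap:
--                     break
--     return out
-- ===== SOURCE B (Python) =====
-- def _normalize_selected(indices, n_photos):
--     if n_photos <= 0:
--         return []
--     cap = min(5, n_photos)
--     # candidate pool: valid picks in order, then the fallback 1..cap
--     # (any fill value actually used is <= cap, so range(1, cap + 1) suffices)
--     pool = [r for r in indices if isinstance(r, int) and 1 <= r <= n_photos]
--     pool += range(1, cap + 1)
--     # index each value by its first position, then order keys by that position
--     first = {}
--     for pos, x in enumerate(pool):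
--         if x not in first:
--             first[x] = pos
--     return sorted(first, key=first.get)[:cap]
-- ===== Notes on version B (the rewrite author's own statement) =====
-- stated objective: alternative
-- what changed: Replaces A's two sequential scan-and-break loops sharing a seen set by an index-then-order scheme: one pass records each candidate's first position in a dict over the pool (filtered picks ++ range capped at cap, since fill values never exceed cap), then the keys are sorted by that position and sliced to cap -- no early breaks and no membership test against the output.
import Mathlib
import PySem

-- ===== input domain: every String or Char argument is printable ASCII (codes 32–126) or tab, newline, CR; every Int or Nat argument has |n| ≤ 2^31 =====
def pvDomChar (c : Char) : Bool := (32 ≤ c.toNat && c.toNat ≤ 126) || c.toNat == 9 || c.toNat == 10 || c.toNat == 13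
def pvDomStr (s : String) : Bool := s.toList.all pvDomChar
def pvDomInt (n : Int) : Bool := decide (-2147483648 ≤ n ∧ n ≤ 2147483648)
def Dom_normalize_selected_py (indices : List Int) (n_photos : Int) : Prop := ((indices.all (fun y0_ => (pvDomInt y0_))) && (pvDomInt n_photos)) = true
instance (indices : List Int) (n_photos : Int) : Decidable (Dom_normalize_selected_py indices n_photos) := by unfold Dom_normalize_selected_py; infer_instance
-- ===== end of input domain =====

-- B replaces A's two sequential loops with shared seen-set and early breaks by a
-- first-position index (dict) over one candidate pool, keys sorted by position, sliced to cap.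


-- ===== PORT A =====
-- first loop of A: over `indices`, with the isinstance check vacuous (elements are Int),
-- the bounds check, the `seen` set, and the early break at `cap`
def pvALoop1 (n_photos cap : Int) : List Int → PySem.Set Int → List Int → PySem.Set Int × List Int
  | [], seen, out => (seen, out)
  | raw :: rest, seen, out =>
    if raw < 1 ∨ n_photos < raw then pvALoop1 n_photos cap rest seen out
    else if PySem.Set.contains seen raw then pvALoop1 n_photos cap rest seen out
    else
      let seen' := PySem.Set.add seen raw
      let out' := out ++ [raw]
      if cap ≤ (out'.length : Int) then (seen', out')
      else pvALoop1 n_photos cap rest seen' out'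

-- second loop of A: for i in range(1, n_photos + 1) (range is lazy, so the port
-- walks a counter instead of materializing the range), same seen/out, early break at cap
def pvALoop2 (cap n_photos : Int) (i : Int) (seen : PySem.Set Int) (out : List Int) :
    PySem.Set Int × List Int :=
  if i < n_photos + 1 then
    if PySem.Set.contains seen i then pvALoop2 cap n_photos (i + 1) seen out
    else
      let seen' := PySem.Set.add seen i
      let out' := out ++ [i]
      if cap ≤ (out'.length : Int) then (seen', out')
      else pvALoop2 cap n_photos (i + 1) seen' out'
  else (seen, out)
termination_by (n_photos + 1 - i).toNat
decreasing_by all_goals omega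

def normalize_selected_py (indices : List Int) (n_photos : Int) : List Int :=
  if n_photos ≤ 0 then []
  else
    let cap := min 5 n_photos
    let r1 := pvALoop1 n_photos cap indices PySem.Set.empty []
    if (r1.2.length : Int) < cap then
      (pvALoop2 cap n_photos 1 r1.1 r1.2).2
    else r1.2

-- ===== PORT B =====
-- B's loop: 'for pos, x in enumerate(pool): if x not in first: first[x] = pos'
def pvBIndex (pairs : List (Int × Int)) (d : PySem.Dict Int Int) : PySem.Dict Int Int :=
  pairs.foldl (fun d p => if PySem.Dict.contains d p.2 then d else PySem.Dict.insert d p.2 p.1) d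

def normalize_selected_py_alt (indices : List Int) (n_photos : Int) : List Int :=
  if n_photos ≤ 0 then []
  else
    let cap := min 5 n_photos
    let pool := indices.filter (fun r => decide (1 ≤ r) && decide (r ≤ n_photos))
      ++ PySem.List.pyRange 1 (cap + 1) 1
    let first := pvBIndex (PySem.List.enumerate pool 0) PySem.Dict.empty
    PySem.List.slice
      (PySem.List.sorted (PySem.Dict.keys first) (fun k => PySem.Dict.getD first k 0) false)
      none (some cap)

-- ===== PRECONDITION & SPEC =====
def Spec_normalize_selected_py (indices : List Int) (n_photos : Int) (out : List Int) : Prop := out = normalize_selected_py_alt indices n_photos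
instance (indices : List Int) (n_photos : Int) (out : List Int) : Decidable (Spec_normalize_selected_py indices n_photos out) := by unfold Spec_normalize_selected_py; infer_instance

-- ===== CLAIM (what is proved, stated in full; the proofs are below) =====
def Claim_equal_normalize_selected_py : Prop := ∀ (indices : List Int) (n_photos : Int), Dom_normalize_selected_py indices n_photos → Spec_normalize_selected_py indices n_photos (normalize_selected_py indices n_photos)

-- ===== LEMMAS AND PROOFS =====

-- ordered dedup accumulated onto `out` (no cap)
def pvDed (out : List Int) : List Int → List Int
  | [] => out
  | x :: xs => if x ∈ out then pvDed out xs else pvDed (out ++ [x]) xs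

-- ordered dedup accumulated onto `out`, breaking as soon as length reaches `cap`
def pvBrk (cap : Int) (out : List Int) : List Int → List Int
  | [] => out
  | x :: xs =>
    if x ∈ out then pvBrk cap out xs
    else if cap ≤ ((out ++ [x]).length : Int) then out ++ [x]
    else pvBrk cap (out ++ [x]) xs

theorem pvDed_prefix (xs out : List Int) : ∃ t, pvDed out xs = out ++ t := by
  induction xs generalizing out with
  | nil => exact ⟨[], by simp [pvDed]⟩
  | cons x xs ih =>
    by_cases h : x ∈ out
    · simpa [pvDed, h] using ih out
    · obtain ⟨t, ht⟩ := ih (out ++ [x])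
      exact ⟨x :: t, by simp [pvDed, h, ht]⟩

theorem pvDed_append (xs ys out : List Int) :
    pvDed out (xs ++ ys) = pvDed (pvDed out xs) ys := by
  induction xs generalizing out with
  | nil => simp [pvDed]
  | cons x xs ih => by_cases h : x ∈ out <;> simp [pvDed, h, ih]

theorem pvDed_subset (xs out : List Int) : ∀ x ∈ xs, x ∈ pvDed out xs := by
  induction xs generalizing out with
  | nil => intro x hx; cases hx
  | cons y ys ih =>
    intro x hx
    by_cases h : y ∈ out
    · rcases List.mem_cons.mp hx with rfl | hx
      · obtain ⟨t, ht⟩ := pvDed_prefix ys out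
        simp [pvDed, h, ht]
      · simpa [pvDed, h] using ih out x hx
    · rcases List.mem_cons.mp hx with rfl | hx
      · obtain ⟨t, ht⟩ := pvDed_prefix ys (out ++ [x])
        simp [pvDed, h, ht]
      · simpa [pvDed, h] using ih (out ++ [y]) x hx

theorem pvALoop1_eq (n cap : Int) (xs out : List Int) :
    pvALoop1 n cap xs out out =
      (pvBrk cap out (xs.filter (fun raw => decide (1 ≤ raw) && decide (raw ≤ n))),
       pvBrk cap out (xs.filter (fun raw => decide (1 ≤ raw) && decide (raw ≤ n)))) := by
  induction xs generalizing out with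
  | nil => simp [pvALoop1, pvBrk]
  | cons x xs ih =>
    by_cases hb : x < 1 ∨ n < x
    · have hp : (decide (1 ≤ x) && decide (x ≤ n)) = false := by
        simp only [Bool.and_eq_false_iff, decide_eq_false_iff_not]; omega
      simp [pvALoop1, hb, hp, ih]
    · have hp : (decide (1 ≤ x) && decide (x ≤ n)) = true := by
        simp only [Bool.and_eq_true, decide_eq_true_eq]; omega
      by_cases hm : x ∈ out
      · simp [pvALoop1, hb, PySem.Set.contains, hm, hp, pvBrk, ih]
      · by_cases hc : cap ≤ (out.length : Int) + 1
        · simp [pvALoop1, hb, PySem.Set.contains, hm, PySem.Set.add, hp, pvBrk, hc]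
        · simp [pvALoop1, hb, PySem.Set.contains, hm, PySem.Set.add, hp, pvBrk, hc, ih]

theorem pvALoop2_eq (cap n_photos : Int) : ∀ (k : Nat) (i : Int) (out : List Int),
    (n_photos + 1 - i).toNat = k →
    pvALoop2 cap n_photos i out out =
      (pvBrk cap out (PySem.List.pyRange i (n_photos + 1) 1),
       pvBrk cap out (PySem.List.pyRange i (n_photos + 1) 1)) := by
  intro k
  induction k with
  | zero =>
    intro i out hk
    have hge : n_photos + 1 ≤ i := by omega
    rw [pvALoop2, if_neg (by omega), PySem.List.pyRange_one_eq_nil hge]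
    simp [pvBrk]
  | succ k ih =>
    intro i out hk
    have hlt : i < n_photos + 1 := by omega
    rw [PySem.List.pyRange_one_cons hlt, pvALoop2, if_pos hlt]
    by_cases hm : i ∈ out
    · simp only [PySem.Set.contains, pvBrk, hm, List.contains_eq_mem,
        decide_true, if_true]
      exact ih (i + 1) out (by omega)
    · by_cases hc : cap ≤ (out.length : Int) + 1
      · simp [PySem.Set.contains, PySem.Set.add, pvBrk, hm, hc]
      · simp only [PySem.Set.contains, PySem.Set.add, pvBrk, hm,
          List.contains_eq_mem, decide_false, if_false, Bool.false_eq_true,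
          List.length_append, List.length_cons, List.length_nil]
        rw [if_neg (by push_cast; omega), if_neg (by push_cast; omega)]
        exact ih (i + 1) (out ++ [i]) (by omega)

theorem pvBrk_eq_take (cap : Int) (xs out : List Int)
    (h : (out.length : Int) < cap) :
    pvBrk cap out xs = (pvDed out xs).take cap.toNat := by
  induction xs generalizing out with
  | nil =>
    simp only [pvBrk, pvDed]
    exact (List.take_of_length_le (by omega)).symm
  | cons x xs ih =>
    by_cases hm : x ∈ out
    · simp [pvBrk, pvDed, hm, ih out h]
    · by_cases hc : cap ≤ (out.length : Int) + 1
      · have hlen : (out ++ [x]).length = cap.toNat := by simp; omega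
        obtain ⟨t, ht⟩ := pvDed_prefix xs (out ++ [x])
        have h1 : pvBrk cap out (x :: xs) = out ++ [x] := by simp [pvBrk, hm, hc]
        have h2 : pvDed out (x :: xs) = out ++ [x] ++ t := by simp [pvDed, hm, ht]
        rw [h1, h2, ← hlen, List.take_left]
      · have h' : (((out ++ [x]).length : Int)) < cap := by simp; omega
        simp [pvBrk, pvDed, hm, hc, ih (out ++ [x]) h']

-- B-side: the first-position dict's keys are the ordered dedup of the pool
theorem pvBIndex_cons (p : Int × Int) (ps : List (Int × Int)) (d : PySem.Dict Int Int) :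
    pvBIndex (p :: ps) d
      = pvBIndex ps (if PySem.Dict.contains d p.2 then d else PySem.Dict.insert d p.2 p.1) := by
  by_cases hc : PySem.Dict.contains d p.2 <;> simp [pvBIndex, hc]

theorem pvBIndex_keys (pairs : List (Int × Int)) (d : PySem.Dict Int Int) :
    (pvBIndex pairs d).keys = pvDed d.keys (pairs.map (·.2)) := by
  induction pairs generalizing d with
  | nil => simp [pvBIndex, pvDed]
  | cons p ps ih =>
    rw [pvBIndex_cons, List.map_cons]
    by_cases hc : PySem.Dict.contains d p.2
    · have hm : p.2 ∈ d.keys := (PySem.Dict.contains_iff_mem_keys d p.2).mp hc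
      rw [if_pos hc, ih]
      simp [pvDed, hm]
    · have hm : p.2 ∉ d.keys := fun h => hc ((PySem.Dict.contains_iff_mem_keys d p.2).mpr h)
      rw [if_neg hc, ih, PySem.Dict.keys_insert_of_not_contains d p.1 (by simpa using hc)]
      simp [pvDed, hm]

-- B-side: the dict built over enumerate has nodup keys, values bounded by the
-- positions consumed, and items strictly increasing in the position component
theorem pvBIndex_inv (xs : List Int) : ∀ (s : Int) (d : PySem.Dict Int Int),
    d.keys.Nodup → (∀ p ∈ d.items, p.2 < s) →
    d.items.Pairwise (fun p q => p.2 < q.2) →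
    (pvBIndex (PySem.List.enumerate xs s) d).keys.Nodup ∧
    (∀ p ∈ (pvBIndex (PySem.List.enumerate xs s) d).items, p.2 < s + xs.length) ∧
    (pvBIndex (PySem.List.enumerate xs s) d).items.Pairwise (fun p q => p.2 < q.2) := by
  induction xs with
  | nil =>
    intro s d h1 h2 h3
    rw [PySem.List.enumerate_nil]
    exact ⟨h1, fun p hp => by have := h2 p hp; simp only [List.length_nil]; omega, h3⟩
  | cons x xs ih =>
    intro s d h1 h2 h3
    rw [PySem.List.enumerate_cons, pvBIndex_cons]
    by_cases hc : PySem.Dict.contains d x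
    · simp only [if_pos hc]
      obtain ⟨a, b, c⟩ := ih (s + 1) d h1 (fun p hp => by have := h2 p hp; omega) h3
      exact ⟨a, fun p hp => by have := b p hp; simp only [List.length_cons] at this ⊢; push_cast at this ⊢; omega, c⟩
    · simp only [if_neg hc]
      have hitems : (d.insert x s).items = d.items ++ [(x, s)] :=
        PySem.Dict.items_insert_of_not_contains d s (by simpa using hc)
      have h1' : (d.insert x s).keys.Nodup := PySem.Dict.nodup_keys_insert d x s h1
      have h2' : ∀ p ∈ (d.insert x s).items, p.2 < s + 1 := by
        intro p hp
        rw [hitems] at hp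
        rcases List.mem_append.mp hp with hp | hp
        · have := h2 p hp; omega
        · simp at hp; subst hp; omega
      have h3' : (d.insert x s).items.Pairwise (fun p q => p.2 < q.2) := by
        rw [hitems]
        refine List.pairwise_append.mpr ⟨h3, List.pairwise_singleton _ _, ?_⟩
        intro p hp q hq
        simp at hq; subst hq
        exact h2 p hp
      obtain ⟨a, b, c⟩ := ih (s + 1) (d.insert x s) h1' h2' h3'
      exact ⟨a, fun p hp => by have := b p hp; simp only [List.length_cons] at this ⊢; push_cast at this ⊢; omega, c⟩

-- B-side: sorting the keys by their recorded first position is the identity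
theorem pvBIndex_sorted (xs : List Int) :
    PySem.List.sorted (pvBIndex (PySem.List.enumerate xs 0) PySem.Dict.empty).keys
      (fun k => PySem.Dict.getD (pvBIndex (PySem.List.enumerate xs 0) PySem.Dict.empty) k 0) false
    = (pvBIndex (PySem.List.enumerate xs 0) PySem.Dict.empty).keys := by
  obtain ⟨hnd, -, hpw⟩ := pvBIndex_inv xs 0 PySem.Dict.empty
    (by simp [PySem.Dict.keys_empty])
    (by intro p hp; simp [PySem.Dict.empty] at hp)
    (by simp [PySem.Dict.empty])
  set d := pvBIndex (PySem.List.enumerate xs 0) PySem.Dict.empty with hd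
  apply PySem.List.sorted_eq_self_of_pairwise
  have hitems := PySem.Dict.items_eq_map_keys d hnd (0 : Int)
  rw [hitems] at hpw
  have := (List.pairwise_map).mp hpw
  exact this.imp (fun h => le_of_lt h)

-- ===== VERDICT (by name: the statement is the Claim_ definition above) =====
theorem normalize_selected_py_spec : Claim_equal_normalize_selected_py := by
  intro indices n_photos _
  show normalize_selected_py indices n_photos = normalize_selected_py_alt indices n_photos
  unfold normalize_selected_py normalize_selected_py_alt
  by_cases hn : n_photos ≤ 0
  · simp [hn]
  · simp only [hn]
    set cap := min 5 n_photos with hcap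
    have hcap1 : 1 ≤ cap := by omega
    set valid := indices.filter (fun raw => decide (1 ≤ raw) && decide (raw ≤ n_photos)) with hv
    set Rc := PySem.List.pyRange 1 (cap + 1) 1 with hRc
    set Rn := PySem.List.pyRange 1 (n_photos + 1) 1 with hRn
    have h1 : pvALoop1 n_photos cap indices PySem.Set.empty [] =
        (pvBrk cap [] valid, pvBrk cap [] valid) := pvALoop1_eq n_photos cap indices []
    have hb1 : pvBrk cap [] valid = (pvDed [] valid).take cap.toNat :=
      pvBrk_eq_take cap valid [] (by simpa using hcap1)
    -- length of the deduped (valid ++ Rc) is at least cap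
    have hlenRc : Rc.length = cap.toNat := by
      rw [hRc, PySem.List.length_pyRange_one]; omega
    have hlen2 : cap.toNat ≤ (pvDed (pvDed [] valid) Rc).length := by
      have hsub : Rc ⊆ pvDed (pvDed [] valid) Rc := fun x hx => pvDed_subset Rc _ x hx
      have hnd : Rc.Nodup := by rw [hRc]; exact PySem.List.nodup_pyRange_one 1 (cap + 1)
      have := (List.subperm_of_subset hnd hsub).length_le
      omega
    -- B's output is take cap of the ordered dedup of the pool
    have hBside : PySem.List.slice
        (PySem.List.sorted (pvBIndex (PySem.List.enumerate (valid ++ Rc) 0) PySem.Dict.empty).keys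
          (fun k => PySem.Dict.getD (pvBIndex (PySem.List.enumerate (valid ++ Rc) 0) PySem.Dict.empty) k 0) false)
        none (some cap)
        = (pvDed (pvDed [] valid) Rc).take cap.toNat := by
      rw [pvBIndex_sorted, pvBIndex_keys, PySem.List.map_snd_enumerate,
        PySem.Dict.keys_empty, pvDed_append, PySem.List.slice_to _ (by omega)]
    rw [hBside, h1]
    by_cases hlt : ((pvBrk cap [] valid).length : Int) < cap
    · -- the first loop did not fill the cap: A runs the second loop over Rn
      have hVlt : (pvDed [] valid).length < cap.toNat := by
        rw [hb1, List.length_take] at hlt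
        omega
      have hfull : pvBrk cap [] valid = pvDed [] valid := by
        rw [hb1]
        exact List.take_of_length_le (by omega)
      simp only [hlt,
        pvALoop2_eq cap n_photos (n_photos + 1 - 1).toNat 1 (pvBrk cap [] valid) rfl]
      rw [hfull, pvBrk_eq_take cap Rn (pvDed [] valid) (by omega)]
      -- Rn = Rc ++ tail range, and the Rc part already yields ≥ cap elements
      have hsplit : Rn = Rc ++ PySem.List.pyRange (cap + 1) (n_photos + 1) 1 := by
        rw [hRn, hRc]
        exact (PySem.List.pyRange_one_append 1 (cap + 1) (n_photos + 1) (by omega) (by omega))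
      rw [hsplit, pvDed_append]
      obtain ⟨t, ht⟩ := pvDed_prefix (PySem.List.pyRange (cap + 1) (n_photos + 1) 1)
        (pvDed (pvDed [] valid) Rc)
      rw [ht, List.take_append_of_le_length hlen2]
      simp
    · -- the first loop already produced cap elements
      have hVge : cap.toNat ≤ (pvDed [] valid).length := by
        rw [hb1, List.length_take] at hlt
        omega
      simp only [if_neg hlt]
      rw [hb1]
      obtain ⟨t, ht⟩ := pvDed_prefix Rc (pvDed [] valid)
      rw [ht, List.take_append_of_le_length hVge]
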